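-- pv_equiv track=rewrite | github.com/TheTweak/coding-int-prep | search_and_sort/sparse_search.py | search
-- ===== SOURCE A (Python) =====
-- def skip_empty(n: list[str], l: int, h: int) -> int:
-- 	'''
-- 	Finds first non empty element on interval [l, h], going from h->l
-- 	and returns its index. Returns -1 if no non empty elemnts found.
-- 	'''
-- 	if l > h:
-- 		return -1
--
-- 	m = (l + h) // 2
-- 	if n[m] != '':
-- 		return m
-- 	else:
-- 		return skip_empty(n, l, m - 1)
--
-- def get_new_middle(n: list[str], l: int, h: int) -> int:
-- 	m = (l + h) // 2
-- 	m_ = skip_empty(n, l, m - 1) # try left half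
-- 	if m_ != -1:
-- 		return m_
-- 	return skip_empty(n, m + 1, h) # try right half
--
-- def search(n: list[str], el: str, l: int, h: int) -> int:
-- 	if l >= h:
-- 		return -1
--
-- 	m = (l + h) // 2
-- 	if n[m] == '':
-- 		m = get_new_middle(n, l, h)
-- 		if m == -1:
-- 			return -1
--
-- 	x = n[m]
-- 	if x == el:
-- 		return m
-- 	elif x > el:
-- 		return search(n, el, l, m - 1)
-- 	else:
-- 		return search(n, el, m + 1, h)
-- ===== SOURCE B (Python) =====
-- def _probe_indices(l: int, h: int) -> list[int]:
--     '''Midpoint-descending index sequence for interval [l, h]: m, then the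
--     midpoints of [l, m-1], and so on.'''
--     idxs = []
--     while l <= h:
--         m = (l + h) // 2
--         idxs.append(m)
--         h = m - 1
--     return idxs
--
-- def _first_nonempty(n: list[str], idxs: list[int]) -> int:
--     for j in idxs:
--         if n[j] != '':
--             return j
--     return -1
--
-- def _step(n: list[str], el: str, l: int, h: int):
--     '''One round of the search: ('ret', r) to finish with r, ('loop', l2, h2) to continue.'''
--     m = (l + h) // 2
--     if n[m] == '':
--         m = _first_nonempty(n, _probe_indices(l, m - 1) + _probe_indices(m + 1, h))
--         if m == -1:
--             return ('ret', -1)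
--     x = n[m]
--     if x == el:
--         return ('ret', m)
--     if x > el:
--         return ('loop', l, m - 1)
--     return ('loop', m + 1, h)
--
-- def search(n: list[str], el: str, l: int, h: int) -> int:
--     # Explicit state machine: a pure one-round step function driven by a while loop.
--     while l < h:
--         r = _step(n, el, l, h)
--         if r[0] == 'ret':
--             return r[1]
--         l, h = r[1], r[2]
--     return -1
-- ===== Notes on version B (the rewrite author's own statement) =====
-- stated objective: alternative
-- what changed: Replaced the three mutually calling recursive functions by an explicit state machine: a pure one-round step function driven by a single while loop, with the empty-skipping probe done as a staged pass that first generates the midpoint-descending index list and then scans it for the first non-empty entry.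
-- outside the precondition, e.g. on search(['a', 'b'], 'a', -2, 1): A returns -1, B returns -1
import Mathlib
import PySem

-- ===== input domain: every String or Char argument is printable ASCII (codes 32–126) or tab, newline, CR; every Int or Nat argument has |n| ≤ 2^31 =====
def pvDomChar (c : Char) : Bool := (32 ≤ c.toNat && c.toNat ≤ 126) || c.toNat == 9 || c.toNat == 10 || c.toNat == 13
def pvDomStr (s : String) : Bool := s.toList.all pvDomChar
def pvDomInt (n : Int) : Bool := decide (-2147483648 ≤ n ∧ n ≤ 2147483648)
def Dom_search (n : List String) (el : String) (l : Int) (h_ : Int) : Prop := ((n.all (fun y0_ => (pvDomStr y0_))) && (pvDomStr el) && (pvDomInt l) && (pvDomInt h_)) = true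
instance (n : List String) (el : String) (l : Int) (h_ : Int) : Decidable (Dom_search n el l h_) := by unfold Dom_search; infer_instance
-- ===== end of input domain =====

-- B replaces A's three mutually calling recursive functions by an explicit state machine
-- (a pure one-round step function driven by a loop) with the empty-skipping probe done as a
-- staged pass (generate the midpoint-descending index list, then scan it); same values, not faster.


-- ===== PORT A =====
-- n[m] is ported as PySem.List.pyGetD n m "" (exact under Pre_search, which keeps every probed index in range).
-- Each Python recursion is rendered totally with explicit fuel; the fuel (interval length) is
-- sufficient, since every recursive call strictly shrinks the interval, so the 0 case is the
-- same l > h_ (resp. l ≥ h_) base case of the Python.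
def skipGo (n : List String) : Nat → Int → Int → Int
  | 0, _, _ => -1
  | k+1, l, h_ =>
    if l > h_ then -1
    else if PySem.List.pyGetD n (PySem.Int.floordiv (l + h_) 2) "" ≠ "" then
      PySem.Int.floordiv (l + h_) 2
    else skipGo n k l (PySem.Int.floordiv (l + h_) 2 - 1)

def skip_empty (n : List String) (l : Int) (h_ : Int) : Int :=
  skipGo n (h_ + 1 - l).toNat l h_

def get_new_middle (n : List String) (l : Int) (h_ : Int) : Int :=
  if skip_empty n l (PySem.Int.floordiv (l + h_) 2 - 1) ≠ -1 then
    skip_empty n l (PySem.Int.floordiv (l + h_) 2 - 1) -- try left half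
  else skip_empty n (PySem.Int.floordiv (l + h_) 2 + 1) h_ -- try right half

def searchGo (n : List String) (el : String) : Nat → Int → Int → Int
  | 0, _, _ => -1
  | k+1, l, h_ =>
    if l ≥ h_ then -1
    else
      if PySem.List.pyGetD n (PySem.Int.floordiv (l + h_) 2) "" = "" then
        if get_new_middle n l h_ = -1 then -1
        else
          if PySem.List.pyGetD n (get_new_middle n l h_) "" = el then get_new_middle n l h_
          else if PySem.List.pyGetD n (get_new_middle n l h_) "" > el then
            searchGo n el k l (get_new_middle n l h_ - 1)
          else searchGo n el k (get_new_middle n l h_ + 1) h_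
      else
        if PySem.List.pyGetD n (PySem.Int.floordiv (l + h_) 2) "" = el then
          PySem.Int.floordiv (l + h_) 2
        else if PySem.List.pyGetD n (PySem.Int.floordiv (l + h_) 2) "" > el then
          searchGo n el k l (PySem.Int.floordiv (l + h_) 2 - 1)
        else searchGo n el k (PySem.Int.floordiv (l + h_) 2 + 1) h_

def search (n : List String) (el : String) (l : Int) (h_ : Int) : Int :=
  searchGo n el (h_ - l).toNat l h_

-- ===== PORT B =====
-- _probe_indices of Source B: build the midpoint-descending index list of [l, h] (no element tests);
-- the while loop is rendered with fuel = interval length, sufficient since h shrinks each round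
def probeIdxs (n_fuel : Nat) (l : Int) (h : Int) : List Int :=
  match n_fuel with
  | 0 => []
  | k+1 =>
    if l ≤ h then
      PySem.Int.floordiv (l + h) 2 :: probeIdxs k l (PySem.Int.floordiv (l + h) 2 - 1)
    else []

def probeIdxsF (l : Int) (h : Int) : List Int := probeIdxs (h + 1 - l).toNat l h

-- _first_nonempty of Source B: scan a prebuilt index list for the first non-empty entry
def firstNonempty (n : List String) : List Int → Int
  | [] => -1
  | j :: rest => if PySem.List.pyGetD n j "" ≠ "" then j else firstNonempty n rest

-- _step of Source B: one round of the state machine; Sum.inl r = ('ret', r), Sum.inr (l2, h2) = ('loop', l2, h2)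
def stepB (n : List String) (el : String) (l : Int) (h_ : Int) : Sum Int (Int × Int) :=
  if PySem.List.pyGetD n (PySem.Int.floordiv (l + h_) 2) "" = "" then
    if firstNonempty n (probeIdxsF l (PySem.Int.floordiv (l + h_) 2 - 1) ++
        probeIdxsF (PySem.Int.floordiv (l + h_) 2 + 1) h_) = -1 then Sum.inl (-1)
    else if PySem.List.pyGetD n (firstNonempty n (probeIdxsF l (PySem.Int.floordiv (l + h_) 2 - 1) ++
        probeIdxsF (PySem.Int.floordiv (l + h_) 2 + 1) h_)) "" = el then
      Sum.inl (firstNonempty n (probeIdxsF l (PySem.Int.floordiv (l + h_) 2 - 1) ++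
        probeIdxsF (PySem.Int.floordiv (l + h_) 2 + 1) h_))
    else if PySem.List.pyGetD n (firstNonempty n (probeIdxsF l (PySem.Int.floordiv (l + h_) 2 - 1) ++
        probeIdxsF (PySem.Int.floordiv (l + h_) 2 + 1) h_)) "" > el then
      Sum.inr (l, firstNonempty n (probeIdxsF l (PySem.Int.floordiv (l + h_) 2 - 1) ++
        probeIdxsF (PySem.Int.floordiv (l + h_) 2 + 1) h_) - 1)
    else Sum.inr (firstNonempty n (probeIdxsF l (PySem.Int.floordiv (l + h_) 2 - 1) ++
        probeIdxsF (PySem.Int.floordiv (l + h_) 2 + 1) h_) + 1, h_)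
  else
    if PySem.List.pyGetD n (PySem.Int.floordiv (l + h_) 2) "" = el then
      Sum.inl (PySem.Int.floordiv (l + h_) 2)
    else if PySem.List.pyGetD n (PySem.Int.floordiv (l + h_) 2) "" > el then
      Sum.inr (l, PySem.Int.floordiv (l + h_) 2 - 1)
    else Sum.inr (PySem.Int.floordiv (l + h_) 2 + 1, h_)

-- the while loop of Source B's search, driving the step function; rendered with fuel = interval
-- length (each continuing round strictly shrinks h_ - l, so the 0 fallback is never reached)
def loopB (n : List String) (el : String) : Nat → Int → Int → Int
  | 0, _, _ => -1
  | k+1, l, h_ =>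
    if l < h_ then
      match stepB n el l h_ with
      | Sum.inl r => r
      | Sum.inr (l', h') => loopB n el k l' h'
    else -1

def search_alt (n : List String) (el : String) (l : Int) (h_ : Int) : Int :=
  loopB n el (h_ - l).toNat l h_

-- ===== PRECONDITION & SPEC =====
-- Pre_ excludes out-of-range bounds (l < 0 or h_ ≥ len n, with l < h_): there A either raises
-- IndexError or silently searches through Python's negative-index wraparound, an accident of indexing.
def Pre_search (n : List String) (el : String) (l : Int) (h_ : Int) : Prop :=
  l ≥ h_ ∨ (0 ≤ l ∧ h_ < n.length)
instance (n : List String) (el : String) (l : Int) (h_ : Int) : Decidable (Pre_search n el l h_) := by unfold Pre_search; infer_instance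
def pvWitness_search : List String × String × Int × Int := (["a", "", "b"], "b", 0, 2)

def Spec_search (n : List String) (el : String) (l : Int) (h_ : Int) (out : Int) : Prop := out = search_alt n el l h_
instance (n : List String) (el : String) (l : Int) (h_ : Int) (out : Int) : Decidable (Spec_search n el l h_ out) := by unfold Spec_search; infer_instance

-- ===== CLAIM (what is proved, stated in full; the proofs are below) =====
def Claim_equal_search : Prop := ∀ (n : List String) (el : String) (l : Int) (h_ : Int), Dom_search n el l h_ → Pre_search n el l h_ → Spec_search n el l h_ (search n el l h_)

-- ===== LEMMAS AND PROOFS =====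
theorem skipGo_bounds (n : List String) : ∀ (k : Nat) (l h_ : Int),
    skipGo n k l h_ = -1 ∨ (l ≤ skipGo n k l h_ ∧ skipGo n k l h_ ≤ h_) := by
  intro k
  induction k with
  | zero => intro l h_; left; rfl
  | succ k ih =>
    intro l h_
    rw [skipGo]
    by_cases hgt : l > h_
    · simp [hgt]
    · have hb := PySem.Int.floordiv_two_mid_bounds (lo := l) (hi := h_) (by omega)
      simp only [if_neg hgt]
      split_ifs with hne
      · right; omega
      · rcases ih l (PySem.Int.floordiv (l + h_) 2 - 1) with h1 | h1
        · left; exact h1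
        · right; omega

theorem get_new_middle_bounds (n : List String) (l h_ : Int) (hlt : l < h_) :
    get_new_middle n l h_ = -1 ∨ (l ≤ get_new_middle n l h_ ∧ get_new_middle n l h_ ≤ h_) := by
  unfold get_new_middle skip_empty
  have hb := PySem.Int.floordiv_two_mid_bounds (lo := l) (hi := h_) (by omega)
  have h1 := skipGo_bounds n (PySem.Int.floordiv (l + h_) 2 - 1 + 1 - l).toNat l
    (PySem.Int.floordiv (l + h_) 2 - 1)
  have h2 := skipGo_bounds n (h_ + 1 - (PySem.Int.floordiv (l + h_) 2 + 1)).toNat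
    (PySem.Int.floordiv (l + h_) 2 + 1) h_
  split_ifs with hne
  · rcases h1 with h1 | h1
    · exact absurd h1 hne
    · right; omega
  · rcases h2 with h2 | h2
    · left; exact h2
    · right; omega

theorem probeIdxs_mem : ∀ (k : Nat) (l h : Int), ∀ j ∈ probeIdxs k l h, l ≤ j ∧ j ≤ h := by
  intro k
  induction k with
  | zero => intro l h j hj; simp [probeIdxs] at hj
  | succ k ih =>
    intro l h j hj
    rw [probeIdxs] at hj
    by_cases hle : l ≤ h
    · have hb := PySem.Int.floordiv_two_mid_bounds (lo := l) (hi := h) hle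
      simp only [if_pos hle, List.mem_cons] at hj
      rcases hj with rfl | hj
      · omega
      · have := ih l (PySem.Int.floordiv (l + h) 2 - 1) j hj
        omega
    · simp [hle] at hj

theorem firstNonempty_probe (n : List String) : ∀ (k : Nat) (l h : Int),
    firstNonempty n (probeIdxs k l h) = skipGo n k l h := by
  intro k
  induction k with
  | zero => intro l h; rfl
  | succ k ih =>
    intro l h
    rw [probeIdxs, skipGo]
    by_cases hle : l ≤ h
    · have hgt : ¬ l > h := by omega
      simp only [if_pos hle, if_neg hgt, firstNonempty]
      split_ifs with hne
      · rfl
      · exact ih l (PySem.Int.floordiv (l + h) 2 - 1)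
    · have hgt : l > h := by omega
      simp [hle, hgt, firstNonempty]

theorem firstNonempty_append (n : List String) (xs ys : List Int)
    (hxs : ∀ j ∈ xs, (-1 : Int) < j) :
    firstNonempty n (xs ++ ys) =
      if firstNonempty n xs = -1 then firstNonempty n ys else firstNonempty n xs := by
  induction xs with
  | nil => simp [firstNonempty]
  | cons j rest ih =>
    have hj : (-1 : Int) < j := hxs j List.mem_cons_self
    have hj' : ¬ (j = -1) := by omega
    rw [List.cons_append, firstNonempty, firstNonempty]
    by_cases hne : PySem.List.pyGetD n j "" ≠ ""
    · simp [hne, hj']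
    · simp only [if_neg hne]
      rw [ih (fun j hj => hxs j (List.mem_cons_of_mem _ hj))]

theorem gnm_eq (n : List String) (l h_ : Int) (hl : 0 ≤ l) :
    firstNonempty n (probeIdxsF l (PySem.Int.floordiv (l + h_) 2 - 1) ++
      probeIdxsF (PySem.Int.floordiv (l + h_) 2 + 1) h_) = get_new_middle n l h_ := by
  unfold probeIdxsF
  rw [firstNonempty_append n _ _
      (fun j hj => by
        have := probeIdxs_mem (PySem.Int.floordiv (l + h_) 2 - 1 + 1 - l).toNat l
          (PySem.Int.floordiv (l + h_) 2 - 1) j hj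
        omega),
    firstNonempty_probe n (PySem.Int.floordiv (l + h_) 2 - 1 + 1 - l).toNat l
      (PySem.Int.floordiv (l + h_) 2 - 1),
    firstNonempty_probe n (h_ + 1 - (PySem.Int.floordiv (l + h_) 2 + 1)).toNat
      (PySem.Int.floordiv (l + h_) 2 + 1) h_]
  unfold get_new_middle skip_empty
  split_ifs with h1 h2 <;> first | rfl | (exact absurd h2 h1) | (exact absurd h1 h2)

theorem searchGo_eq_loopB (n : List String) (el : String) : ∀ (k : Nat) (l h_ : Int), 0 ≤ l →
    searchGo n el k l h_ = loopB n el k l h_ := by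
  intro k
  induction k with
  | zero => intro l h_ _; rfl
  | succ k ih =>
    intro l h_ hl
    rw [searchGo, loopB]
    by_cases hge : l ≥ h_
    · have h2 : ¬ l < h_ := by omega
      simp [hge, h2]
    · have hlt : l < h_ := by omega
      have hb := PySem.Int.floordiv_two_mid_bounds (lo := l) (hi := h_) (by omega)
      have hgm := get_new_middle_bounds n l h_ hlt
      simp only [if_neg hge, if_pos hlt, stepB, gnm_eq n l h_ hl]
      split_ifs with hE hg hx1 hx2 hx1 hx2
      · rfl
      · rfl
      · exact ih l (get_new_middle n l h_ - 1) hl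
      · exact ih (get_new_middle n l h_ + 1) h_ (by omega)
      · rfl
      · exact ih l (PySem.Int.floordiv (l + h_) 2 - 1) hl
      · exact ih (PySem.Int.floordiv (l + h_) 2 + 1) h_ (by omega)

-- ===== VERDICT (by name: the statement is the Claim_ definition above) =====
theorem search_spec : Claim_equal_search := by
  intro n el l h_ _ hpre
  unfold Spec_search search search_alt
  rcases hpre with hge | ⟨hl, _⟩
  · have h0 : (h_ - l).toNat = 0 := by omega
    rw [h0]
    rfl
  · exact searchGo_eq_loopB n el (h_ - l).toNat l h_ hl
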